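-- pv_equiv track=rewrite | github.com/vvaalleerraa/w2v | main-w2v-cbow.py | generate_cbow_data
-- ===== SOURCE A (Python) =====
-- def generate_cbow_data(text, word_to_idx, window_size=2):
--     data = []
--     for i in range(window_size, len(text) - window_size):
--         target = word_to_idx.get(text[i], word_to_idx['<UNK>'])
--         context = [
--             word_to_idx.get(text[i + j], word_to_idx['<UNK>'])
--             for j in range(-window_size, window_size + 1)
--             if j != 0
--         ]
--         data.append((context, target))
--     return data
-- ===== SOURCE B (Python) =====
-- def generate_cbow_data(text, word_to_idx, window_size=2):
--     if len(text) <= 2 * window_size: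
--         return []
--     unk = word_to_idx['<UNK>']
--     full = 2 * window_size + 1
--     data = []
--     window = []
--     for w in text:
--         window.append(word_to_idx.get(w, unk))
--         if len(window) == full:
--             data.append((window[:window_size] + window[window_size + 1:],
--                          window[window_size]))
--             del window[0]
--     return data
-- ===== Notes on version B (the rewrite author's own statement) =====
-- stated objective: alternative
-- what changed: B streams the text once through a bounded sliding buffer (append one mapped index, emit a pair whenever the buffer reaches 2w+1 entries, drop the oldest), instead of A's indexed outer loop that redoes 2w+2 dict lookups (including a fresh '<UNK>' lookup) per window via an inner offset loop.
import Mathlib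
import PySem

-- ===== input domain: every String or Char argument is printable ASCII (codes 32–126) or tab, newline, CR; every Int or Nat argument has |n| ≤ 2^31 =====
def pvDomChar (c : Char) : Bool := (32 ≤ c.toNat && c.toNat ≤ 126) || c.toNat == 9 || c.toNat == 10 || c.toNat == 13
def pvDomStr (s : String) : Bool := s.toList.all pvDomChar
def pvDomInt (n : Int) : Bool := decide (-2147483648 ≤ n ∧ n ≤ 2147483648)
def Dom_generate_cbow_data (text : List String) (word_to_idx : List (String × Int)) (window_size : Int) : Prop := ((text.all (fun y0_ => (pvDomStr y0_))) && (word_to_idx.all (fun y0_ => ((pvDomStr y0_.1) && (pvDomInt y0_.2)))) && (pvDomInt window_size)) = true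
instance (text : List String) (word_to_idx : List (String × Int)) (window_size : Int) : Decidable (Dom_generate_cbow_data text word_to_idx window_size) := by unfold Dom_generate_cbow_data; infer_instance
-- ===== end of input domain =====

-- B streams the text once through a bounded sliding buffer (emit a pair whenever the buffer fills,
-- then drop its oldest entry) instead of A's indexed loop with 2w+2 dict lookups per window
-- (an alternative decomposition of the same cost).

-- ===== PORT A =====
def generate_cbow_data (text : List String) (word_to_idx : List (String × Int)) (window_size : Int) : List (List Int × Int) :=
  let d := PySem.Dict.mk word_to_idx
  (PySem.List.pyRange window_size ((text.length : Int) - window_size) 1).foldl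
    (fun data i =>
      let target := (PySem.Dict.get? d ((PySem.List.pyGet? text i).getD "")).getD
                      ((PySem.Dict.get? d "<UNK>").getD 0)
      let context := (PySem.List.pyRange (-window_size) (window_size + 1) 1).foldl
        (fun acc j =>
          if j ≠ 0 then
            acc ++ [(PySem.Dict.get? d ((PySem.List.pyGet? text (i + j)).getD "")).getD
                      ((PySem.Dict.get? d "<UNK>").getD 0)]
          else acc) []
      data ++ [(context, target)]) []

-- ===== PORT B =====
def generate_cbow_data_alt (text : List String) (word_to_idx : List (String × Int)) (window_size : Int) : List (List Int × Int) :=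
  if (text.length : Int) ≤ 2 * window_size then []
  else
    let d := PySem.Dict.mk word_to_idx
    let unk := (PySem.Dict.get? d "<UNK>").getD 0
    let full : Int := 2 * window_size + 1
    (text.foldl
      (fun (st : List Int × List (List Int × Int)) w =>
        let window := st.1 ++ [(PySem.Dict.get? d w).getD unk]
        if (window.length : Int) = full then
          (window.drop 1,
           st.2 ++ [(PySem.List.slice window none (some window_size) ++
                       PySem.List.slice window (some (window_size + 1)) none,
                     PySem.List.pyGetD window window_size 0)])
        else (window, st.2)) ([], [])).2

-- ===== PRECONDITION & SPEC =====
-- Pre_ excludes exactly the inputs on which A raises: a negative window_size (the index i then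
-- always leaves the text before the loop ends → IndexError, or the eager word_to_idx['<UNK>']
-- raises KeyError first), and a missing '<UNK>' key when the output range is non-empty (A
-- evaluates word_to_idx['<UNK>'] eagerly in every iteration → KeyError).
def Pre_generate_cbow_data (text : List String) (word_to_idx : List (String × Int)) (window_size : Int) : Prop :=
  0 ≤ window_size ∧
  ((text.length : Int) ≤ 2 * window_size ∨ "<UNK>" ∈ word_to_idx.map Prod.fst)
instance (text : List String) (word_to_idx : List (String × Int)) (window_size : Int) : Decidable (Pre_generate_cbow_data text word_to_idx window_size) := by unfold Pre_generate_cbow_data; infer_instance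

def pvWitness_generate_cbow_data : List String × (List (String × Int)) × Int :=
  (["a", "b", "c", "a"], [("a", 0), ("b", 1), ("<UNK>", 2)], 1)

def Spec_generate_cbow_data (text : List String) (word_to_idx : List (String × Int)) (window_size : Int) (out : List (List Int × Int)) : Prop := out = generate_cbow_data_alt text word_to_idx window_size
instance (text : List String) (word_to_idx : List (String × Int)) (window_size : Int) (out : List (List Int × Int)) : Decidable (Spec_generate_cbow_data text word_to_idx window_size out) := by unfold Spec_generate_cbow_data; infer_instance

-- ===== CLAIM =====
def Claim_equal_generate_cbow_data : Prop := ∀ (text : List String) (word_to_idx : List (String × Int)) (window_size : Int), Dom_generate_cbow_data text word_to_idx window_size → Pre_generate_cbow_data text word_to_idx window_size → Spec_generate_cbow_data text word_to_idx window_size (generate_cbow_data text word_to_idx window_size)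

-- ===== LEMMAS AND PROOFS =====

-- Common normal form: the CBOW pair whose window starts at position k of the mapped index list.
def cbPairs (W : Nat) (s : List Int) : List (List Int × Int) :=
  (List.range (s.length - 2 * W)).map
    (fun k => ((s.drop k).take W ++ (s.drop (k + W + 1)).take W, s.getD (k + W) 0))

-- B's loop body, on the already-mapped index stream, with a Nat window size.
def cbStep (W : Nat) (st : List Int × List (List Int × Int)) (x : Int) :
    List Int × List (List Int × Int) :=
  let w := st.1 ++ [x]
  if w.length = 2 * W + 1 then
    (w.drop 1, st.2 ++ [(w.take W ++ w.drop (W + 1), w.getD W 0)])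
  else (w, st.2)

theorem cbPairs_cons (W : Nat) (s : List Int) (h : 2 * W < s.length) :
    cbPairs W s = (s.take W ++ (s.drop (W + 1)).take W, s.getD W 0) :: cbPairs W (s.drop 1) := by
  unfold cbPairs
  have hlen : s.length - 2 * W = (s.length - 1 - 2 * W) + 1 := by omega
  rw [hlen, List.range_succ_eq_map, List.map_cons, List.map_map]
  congr 1
  · simp
  · have hl : (s.drop 1).length - 2 * W = s.length - 1 - 2 * W := by
      rw [List.length_drop]
    rw [hl]
    apply List.map_congr_left
    intro k _
    simp only [Function.comp]
    have h1 : s.drop (k + 1) = (s.drop 1).drop k := by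
      rw [List.drop_drop]; congr 1; omega
    have h2 : s.drop (k + 1 + W + 1) = (s.drop 1).drop (k + W + 1) := by
      rw [List.drop_drop]; congr 1; omega
    have h3 : s.getD (k + 1 + W) 0 = (s.drop 1).getD (k + W) 0 := by
      simp only [List.getD_eq_getElem?_getD, List.getElem?_drop]
      have he : 1 + (k + W) = k + 1 + W := by omega
      rw [he]
    rw [h1, h2, h3]

theorem cbLoop_spec (W : Nat) (xs : List Int) :
    ∀ (pre : List Int) (data : List (List Int × Int)), pre.length ≤ 2 * W →
      (xs.foldl (cbStep W) (pre, data)).2 = data ++ cbPairs W (pre ++ xs) := by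
  induction xs with
  | nil =>
    intro pre data hpre
    simp only [List.foldl_nil]
    unfold cbPairs
    have h0 : (pre ++ ([] : List Int)).length - 2 * W = 0 := by simp; omega
    rw [h0]
    simp
  | cons x xs ih =>
    intro pre data hpre
    rw [List.foldl_cons]
    by_cases hc : pre.length + 1 = 2 * W + 1
    · have hstep : cbStep W (pre, data) x
          = ((pre ++ [x]).drop 1,
             data ++ [((pre ++ [x]).take W ++ (pre ++ [x]).drop (W + 1), (pre ++ [x]).getD W 0)]) := by
        unfold cbStep
        rw [if_pos (by simp; omega)]
      rw [hstep]
      have hpre' : ((pre ++ [x]).drop 1).length ≤ 2 * W := by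
        rw [List.length_drop]; simp; omega
      rw [ih _ _ hpre']
      have hs : (pre ++ [x]).drop 1 ++ xs = (pre ++ x :: xs).drop 1 := by
        rcases pre with _ | ⟨p, ps⟩ <;> simp
      set s := pre ++ x :: xs with hsdef
      have hw : pre ++ [x] = s.take (2 * W + 1) := by
        rw [hsdef, List.take_append, List.take_of_length_le (by omega)]
        have h1 : 2 * W + 1 - pre.length = 1 := by omega
        rw [h1]; simp
      have hslen : 2 * W < s.length := by
        rw [hsdef]; simp; omega
      rw [hs, cbPairs_cons W s hslen]
      have e1 : (s.take (2 * W + 1)).take W = s.take W := by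
        rw [List.take_take, min_eq_left (by omega)]
      have e2 : (s.take (2 * W + 1)).drop (W + 1) = (s.drop (W + 1)).take W := by
        rw [List.drop_take]
        congr 1
        omega
      have e3 : (s.take (2 * W + 1)).getD W 0 = s.getD W 0 := by
        simp only [List.getD_eq_getElem?_getD]
        rw [List.getElem?_take_of_lt (by omega)]
      rw [hw, e1, e2, e3]
      simp
    · have hstep : cbStep W (pre, data) x = (pre ++ [x], data) := by
        unfold cbStep
        rw [if_neg (by simp; omega)]
      rw [hstep]
      have hpre' : (pre ++ [x]).length ≤ 2 * W := by simp; omega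
      rw [ih _ _ hpre']
      congr 2
      simp

-- A slice of the mapped text equals a take-of-drop window of the mapped index list.
theorem map_pyRange_window (text : List String) (f : String → Int) (a b c : Int)
    (h0 : 0 ≤ c + a) (hab : a ≤ b) (hb : c + b ≤ (text.length : Int)) :
    (PySem.List.pyRange a b 1).map (fun j => f ((PySem.List.pyGet? text (c + j)).getD ""))
      = ((text.map f).drop (c + a).toNat).take (b - a).toNat := by
  rw [PySem.List.pyRange_one, List.map_map]
  apply List.ext_getElem
  · simp only [List.length_map, List.length_range, List.length_take, List.length_drop]
    omega
  · intro t h1 h2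
    simp only [List.getElem_map, List.getElem_range, List.getElem_take, List.getElem_drop,
      Function.comp]
    have ht : t < (b - a).toNat := by
      simpa only [List.length_map, List.length_range] using h1
    have hi0 : 0 ≤ c + (a + (t : Int)) := by omega
    have hi1 : c + (a + (t : Int)) < (text.length : Int) := by omega
    rw [PySem.List.pyGet?_eq_some_getElem _ hi0 hi1]
    simp only [Option.getD_some]
    have : (c + (a + (t : Int))).toNat = (c + a).toNat + t := by omega
    simp [this]

theorem A_eq_cbPairs (text : List String) (word_to_idx : List (String × Int)) (ws : Int)
    (hws : 0 ≤ ws) :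
    generate_cbow_data text word_to_idx ws
      = cbPairs ws.toNat
          (text.map (fun w =>
            (PySem.Dict.get? (PySem.Dict.mk word_to_idx) w).getD
              ((PySem.Dict.get? (PySem.Dict.mk word_to_idx) "<UNK>").getD 0))) := by
  unfold generate_cbow_data
  set d := PySem.Dict.mk word_to_idx with hd
  set unk : Int := (PySem.Dict.get? d "<UNK>").getD 0 with hunk
  set f : String → Int := fun w => (PySem.Dict.get? d w).getD unk with hf
  set W : Nat := ws.toNat with hW
  have hWw : (W : Int) = ws := by omega
  rw [PySem.List.foldl_append_singleton_eq_map]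
  simp only [List.nil_append]
  unfold cbPairs
  rw [PySem.List.pyRange_one ws ((text.length : Int) - ws), List.map_map]
  have hM : ((text.length : Int) - ws - ws).toNat = (text.map f).length - 2 * W := by
    simp only [List.length_map]; omega
  rw [hM]
  apply List.map_congr_left
  intro k hk
  have hkM : k < (text.map f).length - 2 * W := by
    simpa using List.mem_range.mp hk
  have hklen : k + 2 * W < text.length := by
    simp only [List.length_map] at hkM; omega
  simp only [Function.comp]
  set i : Int := ws + (k : Int) with hi
  refine Prod.ext ?_ ?_
  -- context
  · rw [PySem.List.foldl_append_ite]
    simp only [List.nil_append]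
    have hsplit : PySem.List.pyRange (-ws) (ws + 1) 1
        = PySem.List.pyRange (-ws) 0 1 ++ (0 :: PySem.List.pyRange 1 (ws + 1) 1) := by
      rw [PySem.List.pyRange_one_append (-ws) 0 (ws + 1) (by omega) (by omega)]
      congr 1
      rw [PySem.List.pyRange_one_cons (by omega)]
      norm_num
    rw [hsplit, List.filter_append, List.filter_cons]
    have hz : (decide ¬((0 : Int) = 0)) = false := by decide
    rw [hz]
    simp only [Bool.false_eq_true, if_false]
    have hneg : (PySem.List.pyRange (-ws) 0 1).filter (fun j => decide ¬(j = 0))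
        = PySem.List.pyRange (-ws) 0 1 := by
      apply List.filter_eq_self.mpr
      intro j hj
      obtain ⟨hj1, hj2⟩ := PySem.List.mem_pyRange_one.mp hj
      simp; omega
    have hpos : (PySem.List.pyRange 1 (ws + 1) 1).filter (fun j => decide ¬(j = 0))
        = PySem.List.pyRange 1 (ws + 1) 1 := by
      apply List.filter_eq_self.mpr
      intro j hj
      obtain ⟨hj1, hj2⟩ := PySem.List.mem_pyRange_one.mp hj
      simp; omega
    rw [hneg, hpos, List.map_append]
    congr 1
    · rw [map_pyRange_window text f (-ws) 0 i (by omega) (by omega) (by omega)]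
      have c1 : (i + -ws).toNat = k := by omega
      have c2 : ((0 : Int) - -ws).toNat = W := by omega
      rw [c1, c2]
    · rw [map_pyRange_window text f 1 (ws + 1) i (by omega) (by omega) (by omega)]
      have c1 : (i + 1).toNat = k + W + 1 := by omega
      have c2 : (ws + 1 - 1).toNat = W := by omega
      rw [c1, c2]
  -- target
  · have h0 : 0 ≤ i := by omega
    have h1 : i < (text.length : Int) := by omega
    rw [PySem.List.pyGet?_eq_some_getElem _ h0 h1]
    simp only [Option.getD_some, List.getD_eq_getElem?_getD]
    have hidx : k + W < (text.map f).length := by simp only [List.length_map]; omega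
    rw [List.getElem?_eq_getElem hidx]
    have hik : i.toNat = k + W := by omega
    simp only [hik, Option.getD_some, List.getElem_map, hf, hunk]

theorem B_eq_cbPairs (text : List String) (word_to_idx : List (String × Int)) (ws : Int)
    (hws : 0 ≤ ws) (hlen : ¬ (text.length : Int) ≤ 2 * ws) :
    generate_cbow_data_alt text word_to_idx ws
      = cbPairs ws.toNat
          (text.map (fun w =>
            (PySem.Dict.get? (PySem.Dict.mk word_to_idx) w).getD
              ((PySem.Dict.get? (PySem.Dict.mk word_to_idx) "<UNK>").getD 0))) := by
  unfold generate_cbow_data_alt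
  rw [if_neg hlen]
  set d := PySem.Dict.mk word_to_idx with hd
  set unk : Int := (PySem.Dict.get? d "<UNK>").getD 0 with hunk
  set f : String → Int := fun w => (PySem.Dict.get? d w).getD unk with hf
  set W : Nat := ws.toNat with hW
  have hWw : (W : Int) = ws := by omega
  have hstep : ∀ (st : List Int × List (List Int × Int)) (w : String),
      (let window := st.1 ++ [(PySem.Dict.get? d w).getD unk]
       if (window.length : Int) = 2 * ws + 1 then
         (window.drop 1,
          st.2 ++ [(PySem.List.slice window none (some ws) ++
                      PySem.List.slice window (some (ws + 1)) none,
                    PySem.List.pyGetD window ws 0)])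
       else (window, st.2)) = cbStep W st (f w) := by
    intro st w
    unfold cbStep
    simp only [hf]
    set window := st.1 ++ [(PySem.Dict.get? d w).getD unk] with hwdef
    have hcond : ((window.length : Int) = 2 * ws + 1) ↔ (window.length = 2 * W + 1) := by
      omega
    by_cases hc : window.length = 2 * W + 1
    · rw [if_pos (hcond.mpr hc), if_pos hc]
      have s1 : PySem.List.slice window none (some ws) = window.take W := by
        rw [← hWw, PySem.List.slice_to_natCast]
      have s2 : PySem.List.slice window (some (ws + 1)) none = window.drop (W + 1) := by
        have hw1 : ws + 1 = ((W + 1 : Nat) : Int) := by omega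
        rw [hw1, PySem.List.slice_from_natCast]
      have s3 : PySem.List.pyGetD window ws 0 = window.getD W 0 := by
        rw [← hWw, PySem.List.pyGetD_natCast]
      rw [s1, s2, s3]
    · rw [if_neg (fun h => hc (hcond.mp h)), if_neg hc]
  show (text.foldl
      (fun (st : List Int × List (List Int × Int)) w =>
        let window := st.1 ++ [(PySem.Dict.get? d w).getD unk]
        if (window.length : Int) = 2 * ws + 1 then
          (window.drop 1,
           st.2 ++ [(PySem.List.slice window none (some ws) ++
                       PySem.List.slice window (some (ws + 1)) none,
                     PySem.List.pyGetD window ws 0)])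
        else (window, st.2)) ([], [])).2 = cbPairs W (text.map f)
  have hfold : text.foldl
      (fun (st : List Int × List (List Int × Int)) w =>
        let window := st.1 ++ [(PySem.Dict.get? d w).getD unk]
        if (window.length : Int) = 2 * ws + 1 then
          (window.drop 1,
           st.2 ++ [(PySem.List.slice window none (some ws) ++
                       PySem.List.slice window (some (ws + 1)) none,
                     PySem.List.pyGetD window ws 0)])
        else (window, st.2)) ([], [])
      = (text.map f).foldl (cbStep W) ([], []) := by
    rw [List.foldl_map]
    congr 1
    funext st w
    exact hstep st w
  rw [hfold, cbLoop_spec W (text.map f) [] [] (by simp)]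
  simp

-- ===== VERDICT =====
theorem generate_cbow_data_spec : Claim_equal_generate_cbow_data := by
  intro text wti ws _hdom hpre
  obtain ⟨hws, _⟩ := hpre
  unfold Spec_generate_cbow_data
  by_cases hlen : (text.length : Int) ≤ 2 * ws
  · rw [A_eq_cbPairs text wti ws hws]
    unfold generate_cbow_data_alt
    rw [if_pos hlen]
    unfold cbPairs
    have h0 : text.length - 2 * ws.toNat = 0 := by omega
    simp [h0]
  · rw [A_eq_cbPairs text wti ws hws, B_eq_cbPairs text wti ws hws hlen]
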